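-- pv_equiv track=rewrite | github.com/lifthus/vector-space-generator | space_generator.py | space_generator_2d
-- ===== SOURCE A (Python) =====
-- def space_generator_2d(length = 1, base=[0,1]):
--   space = []
--   for i in base:
--     space.append([i])
--   new_space = []
--   for i in range(length) :
--     for j in space:
--       for k in base:
--         new_space.append(j+[k])
--     if i!= length-1:
--       space = new_space[:]
--       new_space = []
--   return new_space
-- ===== SOURCE B (Python) =====
-- def space_generator_2d(length = 1, base=[0,1]):
--   if length <= 0:
--     return []
--   def build(n):
--     if n == 0:
--       return [[]]
--     return [row + [k] for row in build(n - 1) for k in base]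
--   return build(length + 1)
-- ===== Notes on version B (the rewrite author's own statement) =====
-- stated objective: idiomatic
-- what changed: Replaces A's level-by-level list-doubling loop with copy/reset bookkeeping by a direct recursion over the number of dimensions building the Cartesian product (build(n) = [row+[k] for row in build(n-1) for k in base]), guarded by an explicit early return of [] for non-positive length.
import Mathlib
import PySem

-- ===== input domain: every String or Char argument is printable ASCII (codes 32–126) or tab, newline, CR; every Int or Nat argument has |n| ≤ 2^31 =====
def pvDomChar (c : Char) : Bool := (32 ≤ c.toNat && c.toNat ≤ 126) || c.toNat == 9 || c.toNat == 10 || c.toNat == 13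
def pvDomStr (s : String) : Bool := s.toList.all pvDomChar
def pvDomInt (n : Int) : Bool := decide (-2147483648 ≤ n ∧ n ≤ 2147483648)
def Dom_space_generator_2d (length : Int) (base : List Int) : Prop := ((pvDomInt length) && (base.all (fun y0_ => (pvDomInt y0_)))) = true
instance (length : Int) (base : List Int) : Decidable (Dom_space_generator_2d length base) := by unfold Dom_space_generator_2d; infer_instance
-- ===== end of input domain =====

-- B replaces A's level-by-level list-doubling loop by a direct recursion over the
-- number of dimensions (more idiomatic); same values, same order.

-- ===== PORT A =====
def space_generator_2d (length : Int) (base : List Int) : List (List Int) :=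
  let space : List (List Int) := base.foldl (fun acc i => acc ++ [[i]]) []
  let st := (PySem.List.pyRange 0 length 1).foldl
    (fun (st : List (List Int) × List (List Int)) i =>
      let ns := st.1.foldl (fun ns j => base.foldl (fun ns k => ns ++ [j ++ [k]]) ns) st.2
      if i ≠ length - 1 then (ns, []) else (st.1, ns))
    (space, [])
  st.2

-- ===== PORT B =====
def pvBuild (base : List Int) : Nat → List (List Int)
  | 0 => [[]]
  | n + 1 => (pvBuild base n).flatMap (fun row => base.map (fun k => row ++ [k]))

def space_generator_2d_alt (length : Int) (base : List Int) : List (List Int) :=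
  if length ≤ 0 then [] else pvBuild base (length + 1).toNat

-- ===== PRECONDITION & SPEC =====
def Spec_space_generator_2d (length : Int) (base : List Int) (out : List (List Int)) : Prop := out = space_generator_2d_alt length base
instance (length : Int) (base : List Int) (out : List (List Int)) : Decidable (Spec_space_generator_2d length base out) := by unfold Spec_space_generator_2d; infer_instance

-- ===== CLAIM (what is proved, stated in full; the proofs are below) =====
def Claim_equal_space_generator_2d : Prop := ∀ (length : Int) (base : List Int), Dom_space_generator_2d length base → Spec_space_generator_2d length base (space_generator_2d length base)

-- ===== LEMMAS AND PROOFS =====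

-- inner foldl over base appends one extension per element
theorem pv_inner (base : List Int) (j : List Int) (ns : List (List Int)) :
    base.foldl (fun ns k => ns ++ [j ++ [k]]) ns = ns ++ base.map (fun k => j ++ [k]) := by
  induction base generalizing ns with
  | nil => simp
  | cons b bs ih => simp [List.foldl, ih]

-- middle foldl over space = append of the flatMap
theorem pv_mid (base : List Int) (s ns : List (List Int)) :
    s.foldl (fun ns j => base.foldl (fun ns k => ns ++ [j ++ [k]]) ns) ns
      = ns ++ s.flatMap (fun j => base.map (fun k => j ++ [k])) := by
  induction s generalizing ns with
  | nil => simp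
  | cons x xs ih =>
    rw [List.foldl_cons, pv_inner, ih]
    simp

-- the initial space equals pvBuild 1
theorem pv_space0 (base : List Int) :
    base.foldl (fun acc i => acc ++ [[i]]) ([] : List (List Int)) = pvBuild base 1 := by
  have h : ∀ acc : List (List Int),
      base.foldl (fun acc i => acc ++ [[i]]) acc = acc ++ base.map (fun i => [i]) := by
    intro acc
    induction base generalizing acc with
    | nil => simp
    | cons b bs ih => simp [List.foldl, ih]
  simp [h, pvBuild]

-- loop invariant: after processing the first m iterations (m ≤ length-1, so the
-- reset branch is always taken), the state is (pvBuild (m+1), [])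
theorem pv_loop (base : List Int) (n : Nat) (m : Nat) (hm : m + 1 ≤ n) :
    (((List.range m).map Int.ofNat).foldl
      (fun (st : List (List Int) × List (List Int)) i =>
        if i ≠ (n : Int) - 1 then
          (st.1.foldl (fun ns j => base.foldl (fun ns k => ns ++ [j ++ [k]]) ns) st.2, [])
        else
          (st.1, st.1.foldl (fun ns j => base.foldl (fun ns k => ns ++ [j ++ [k]]) ns) st.2))
      (pvBuild base 1, []))
    = (pvBuild base (m + 1), []) := by
  induction m with
  | zero => simp
  | succ m ih =>
    have hm' : m + 1 ≤ n := Nat.le_of_succ_le hm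
    rw [List.range_succ, List.map_append, List.foldl_append, ih hm']
    have hne : (Int.ofNat m) ≠ (n : Int) - 1 := by
      simp only [Int.ofNat_eq_natCast]; omega
    simp only [List.map_cons, List.map_nil, List.foldl_cons, List.foldl_nil]
    rw [if_pos hne]
    rw [pv_mid, List.nil_append]
    rfl

-- ===== VERDICT (by name: the statement is the Claim_ definition above) =====
theorem space_generator_2d_spec : Claim_equal_space_generator_2d := by
  unfold Claim_equal_space_generator_2d
  intro length base _
  unfold Spec_space_generator_2d space_generator_2d space_generator_2d_alt
  by_cases hle : length ≤ 0
  · rw [if_pos hle]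
    rw [PySem.List.pyRange_one_eq_nil (by omega)]
    simp
  · rw [if_neg hle]
    push Not at hle
    -- write length as a positive natural n
    obtain ⟨n, hn⟩ : ∃ n : Nat, length = (n : Int) := ⟨length.toNat, by omega⟩
    have hnpos : 1 ≤ n := by omega
    subst hn
    have hrange : PySem.List.pyRange 0 (n : Int) 1
        = ((List.range (n - 1)).map Int.ofNat) ++ [((n : Int) - 1)] := by
      rw [PySem.List.pyRange_one]
      have : ((n : Int) - 0).toNat = n := by omega
      rw [this]
      have hsplit : n = (n - 1) + 1 := by omega
      rw [hsplit, List.range_succ, List.map_append]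
      simp only [zero_add, List.map_cons, List.map_nil]
      congr 2
      omega
    dsimp only
    rw [pv_space0, hrange, List.foldl_append,
        pv_loop base n (n - 1) (by omega)]
    simp only [List.foldl_cons, List.foldl_nil]
    rw [if_neg (by simp)]
    dsimp only
    rw [pv_mid, List.nil_append]
    have ht : ((n : Int) + 1).toNat = (n - 1 + 1) + 1 := by omega
    rw [ht]
    rfl
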